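-- pv_equiv track=rewrite | github.com/Ar-Kareem/SAT_puzzle_solver | src/puzzle_solver/puzzles/heyawake/heyawake.py | return_3_consecutives
-- ===== SOURCE A (Python) =====
-- def return_3_consecutives(int_list: list[int]) -> list[tuple[int, int]]:
--     """Given a list of integers (mostly with duplicates), return every consecutive sequence of 3 integer changes.
--     i.e. return a list of (begin_idx, end_idx) tuples where for each r=int_list[begin_idx:end_idx] we have r[0]!=r[1] and r[-2]!=r[-1] and len(r)>=3"""
--     out = []
--     change_indices = [i for i in range(len(int_list) - 1) if int_list[i] != int_list[i+1]]
--     # notice how for every subsequence r, the subsequence begining index is in change_indices and the ending index - 1 is in change_indices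
--     for i in range(len(change_indices) - 1):
--         begin_idx = change_indices[i]
--         end_idx = change_indices[i+1] + 1  # we want to include the first number in the third sequence
--         if end_idx > len(int_list):
--             continue
--         out.append((begin_idx, end_idx))
--     return out
-- ===== SOURCE B (Python) =====
-- def return_3_consecutives(int_list: list[int]) -> list[tuple[int, int]]:
--     """Single streaming pass: remember only the previous change index; emit a
--     (prev, i+1) pair at each subsequent change instead of first materialising
--     the full list of change indices."""
--     out = []
--     prev = None
--     for i in range(len(int_list) - 1):
--         if int_list[i] != int_list[i + 1]:
--             if prev is not None:
--                 out.append((prev, i + 1))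
--             prev = i
--     return out
-- ===== Notes on version B (the rewrite author's own statement) =====
-- stated objective: simpler
-- what changed: B replaces A's two-phase approach (materialise the full list of change indices, then index-loop over it with a dead end_idx>len guard) by a single streaming pass that remembers only the previous change index and emits (prev, i+1) at each subsequent change.
import Mathlib
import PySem

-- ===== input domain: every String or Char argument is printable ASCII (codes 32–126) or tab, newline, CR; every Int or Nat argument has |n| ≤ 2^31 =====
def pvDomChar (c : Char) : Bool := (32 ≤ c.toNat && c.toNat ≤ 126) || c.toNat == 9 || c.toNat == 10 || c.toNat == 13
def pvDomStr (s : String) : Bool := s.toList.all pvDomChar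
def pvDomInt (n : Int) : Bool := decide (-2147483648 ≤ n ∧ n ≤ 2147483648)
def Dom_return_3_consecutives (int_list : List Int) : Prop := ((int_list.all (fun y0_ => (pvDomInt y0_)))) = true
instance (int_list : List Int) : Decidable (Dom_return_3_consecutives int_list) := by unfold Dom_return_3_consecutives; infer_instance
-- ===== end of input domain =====

-- B is a single streaming pass keeping only the last change index (no intermediate list of
-- change indices); same return value as A, proved equivalent below.

-- ===== PORT A =====
def return_3_consecutives (int_list : List Int) : List (Int × Int) :=
  let change_indices : List Int :=
    (PySem.List.pyRange 0 ((int_list.length : Int) - 1) 1).foldl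
      (fun acc i =>
        if PySem.List.pyGetD int_list i 0 ≠ PySem.List.pyGetD int_list (i + 1) 0
        then acc ++ [i] else acc) []
  (PySem.List.pyRange 0 ((change_indices.length : Int) - 1) 1).foldl
    (fun out i =>
      let begin_idx := PySem.List.pyGetD change_indices i 0
      let end_idx := PySem.List.pyGetD change_indices (i + 1) 0 + 1
      if end_idx > (int_list.length : Int) then out
      else out ++ [(begin_idx, end_idx)]) []

-- ===== PORT B =====
def return_3_consecutives_alt (int_list : List Int) : List (Int × Int) :=
  ((PySem.List.pyRange 0 ((int_list.length : Int) - 1) 1).foldl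
    (fun (s : List (Int × Int) × Option Int) i =>
      if PySem.List.pyGetD int_list i 0 ≠ PySem.List.pyGetD int_list (i + 1) 0 then
        ((match s.2 with
          | some p => s.1 ++ [(p, i + 1)]
          | none => s.1), some i)
      else s) ([], none)).1

-- ===== PRECONDITION & SPEC =====
def Spec_return_3_consecutives (int_list : List Int) (out : List (Int × Int)) : Prop := out = return_3_consecutives_alt int_list
instance (int_list : List Int) (out : List (Int × Int)) : Decidable (Spec_return_3_consecutives int_list out) := by unfold Spec_return_3_consecutives; infer_instance

-- ===== CLAIM (what is proved, stated in full; the proofs are below) =====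
def Claim_equal_return_3_consecutives : Prop := ∀ (int_list : List Int), Dom_return_3_consecutives int_list → Spec_return_3_consecutives int_list (return_3_consecutives int_list)

-- ===== LEMMAS AND PROOFS =====

/-- Pair each change index with its successor: `pairsFrom prev C` is the list of
`(p, c+1)` over consecutive elements of `prev?C`. -/
def pairsFrom : Option Int → List Int → List (Int × Int)
  | _, [] => []
  | none, c :: cs => pairsFrom (some c) cs
  | some p, c :: cs => (p, c + 1) :: pairsFrom (some c) cs

/-- B's streaming fold, over an arbitrary index list, computes `pairsFrom` of the
filtered (change) indices, with the last change as second component. -/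
theorem bfold_eq (p : Int → Prop) [DecidablePred p] :
    ∀ (r : List Int) (out : List (Int × Int)) (prev : Option Int),
      (r.foldl
        (fun (s : List (Int × Int) × Option Int) i =>
          if p i then
            ((match s.2 with
              | some q => s.1 ++ [(q, i + 1)]
              | none => s.1), some i)
          else s) (out, prev))
      = (out ++ pairsFrom prev (r.filter (fun i => decide (p i))),
         (r.filter (fun i => decide (p i))).foldl (fun _ c => some c) prev) := by
  intro r
  induction r with
  | nil => intro out prev; simp [pairsFrom]
  | cons i r ih =>
    intro out prev
    by_cases h : p i
    · cases prev with
      | none => simp [h, ih, pairsFrom]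
      | some q => simp [h, ih, pairsFrom]
    · simp [h, ih]

/-- The adjacent-pair map over indices equals `pairsFrom none`. -/
theorem mapPairs_eq : ∀ (C : List Int),
    (List.range (C.length - 1)).map
      (fun k => (C.getD k 0, C.getD (k + 1) 0 + 1)) = pairsFrom none C
  | [] => by simp [pairsFrom]
  | [a] => by simp [pairsFrom]
  | a :: b :: cs => by
    have ih := mapPairs_eq (b :: cs)
    simp only [List.length_cons, Nat.add_sub_cancel, List.getD_cons_succ, pairsFrom] at ih
    simp only [List.length_cons, Nat.add_sub_cancel]
    rw [List.range_succ_eq_map]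
    simp only [List.map_cons, List.map_map, Function.comp_def, Nat.succ_eq_add_one,
      List.getD_cons_succ, List.getD_cons_zero, pairsFrom]
    rw [ih]

/-- A's second loop: the never-firing guard drops, leaving the adjacent pairs of `C`. -/
theorem aloop (C : List Int) (n : Int) (h : ∀ x ∈ C, 0 ≤ x ∧ x + 2 ≤ n) :
    (PySem.List.pyRange 0 ((C.length : Int) - 1) 1).foldl
      (fun out i =>
        if PySem.List.pyGetD C (i + 1) 0 + 1 > n then out
        else out ++ [(PySem.List.pyGetD C i 0, PySem.List.pyGetD C (i + 1) 0 + 1)]) []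
    = pairsFrom none C := by
  rw [PySem.List.foldl_congr_mem _ _
    (fun out i => out ++ [(PySem.List.pyGetD C i 0, PySem.List.pyGetD C (i + 1) 0 + 1)]) _ ?_]
  · rw [PySem.List.foldl_append_singleton_eq_map, List.nil_append]
    rw [← mapPairs_eq C, PySem.List.pyRange_one]
    have hk0 : ((C.length : Int) - 1).toNat = C.length - 1 := by omega
    simp only [sub_zero, List.map_map]
    rw [hk0]
    apply List.map_congr_left
    intro k _
    have h1 : (0 : Int) + (k : Int) = ((k : Nat) : Int) := by ring
    have h2 : (k : Int) + 1 = ((k + 1 : Nat) : Int) := by push_cast; ring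
    simp only [Function.comp_apply, h1, h2, PySem.List.pyGetD_natCast]
  · intro out i hi
    rw [PySem.List.mem_pyRange_one] at hi
    have h1 : (0 : Int) ≤ i + 1 := by omega
    have hlt : (i + 1).toNat < C.length := by omega
    have hmemC : C.getD (i + 1).toNat 0 ∈ C := by
      rw [List.getD_eq_getElem _ _ hlt]; exact List.getElem_mem hlt
    have hb := h _ hmemC
    have hval : PySem.List.pyGetD C (i + 1) 0 = C.getD (i + 1).toNat 0 :=
      PySem.List.pyGetD_of_nonneg _ _ h1
    simp only [hval]
    rw [if_neg (by omega)]

theorem return_3_consecutives_spec' (int_list : List Int) :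
    return_3_consecutives int_list = return_3_consecutives_alt int_list := by
  show
    ((PySem.List.pyRange 0
        (((((PySem.List.pyRange 0 ((int_list.length : Int) - 1) 1).foldl
            (fun acc i =>
              if PySem.List.pyGetD int_list i 0 ≠ PySem.List.pyGetD int_list (i + 1) 0
              then acc ++ [i] else acc) []).length : Int)) - 1) 1).foldl
      (fun out i =>
        if PySem.List.pyGetD ((PySem.List.pyRange 0 ((int_list.length : Int) - 1) 1).foldl
            (fun acc i =>
              if PySem.List.pyGetD int_list i 0 ≠ PySem.List.pyGetD int_list (i + 1) 0
              then acc ++ [i] else acc) []) (i + 1) 0 + 1 > (int_list.length : Int) then out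
        else out ++ [(PySem.List.pyGetD ((PySem.List.pyRange 0 ((int_list.length : Int) - 1) 1).foldl
            (fun acc i =>
              if PySem.List.pyGetD int_list i 0 ≠ PySem.List.pyGetD int_list (i + 1) 0
              then acc ++ [i] else acc) []) i 0,
          PySem.List.pyGetD ((PySem.List.pyRange 0 ((int_list.length : Int) - 1) 1).foldl
            (fun acc i =>
              if PySem.List.pyGetD int_list i 0 ≠ PySem.List.pyGetD int_list (i + 1) 0
              then acc ++ [i] else acc) []) (i + 1) 0 + 1)]) [])
    = return_3_consecutives_alt int_list
  rw [PySem.List.foldl_append_ite_eq_filter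
    (fun i => PySem.List.pyGetD int_list i 0 ≠ PySem.List.pyGetD int_list (i + 1) 0)]
  rw [List.nil_append]
  unfold return_3_consecutives_alt
  rw [bfold_eq (fun i => PySem.List.pyGetD int_list i 0 ≠ PySem.List.pyGetD int_list (i + 1) 0)]
  rw [aloop _ ((int_list.length : Int)) ?bound]
  · rfl
  case bound =>
    intro x hx
    have hr : x ∈ PySem.List.pyRange 0 ((int_list.length : Int) - 1) 1 :=
      List.mem_of_mem_filter hx
    rw [PySem.List.mem_pyRange_one] at hr
    omega

-- ===== VERDICT (by name: the statement is the Claim_ definition above) =====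
theorem return_3_consecutives_spec : Claim_equal_return_3_consecutives := by
  intro int_list _
  unfold Spec_return_3_consecutives
  exact return_3_consecutives_spec' int_list
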